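-- pv_equiv track=rewrite | github.com/layvenxvyi/py_safe_coding | api/xss.py | find_before_equal
-- ===== SOURCE A (Python) =====
-- def find_before_equal(html, i):
--     while i > 0:
--         if html[i] == " ":
--             i -= 1
--             continue
--         if html[i] == "=":
--             return i
--         return -1
-- ===== SOURCE B (Python) =====
-- def find_before_equal(html, i):
--     if i < 0:
--         return None
--     s = html[:i + 1].rstrip(" ")
--     if not s:
--         return None
--     j = len(s) - 1
--     return j if s[j] == "=" else -1
-- ===== Notes on version B (the rewrite author's own statement) =====
-- stated objective: idiomatic
-- what changed: Replaces the backward character-by-character while-loop with slice html[:i+1], rstrip of trailing spaces and one check of the last remaining character; Pre_ excludes only i>0 with i>=len(html), where A raises IndexError.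
-- intended difference: When 0 <= i and html[1:i+1] is all spaces but html[0] is not a space, A's loop stops before ever examining index 0 and returns None, while B checks that last non-space character and returns 0 if it is '=' else -1, which is the intended 'find the non-space char before position i' behaviour. — e.g. on find_before_equal("= ", 1): A returns none, B returns some 0
import Mathlib
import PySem

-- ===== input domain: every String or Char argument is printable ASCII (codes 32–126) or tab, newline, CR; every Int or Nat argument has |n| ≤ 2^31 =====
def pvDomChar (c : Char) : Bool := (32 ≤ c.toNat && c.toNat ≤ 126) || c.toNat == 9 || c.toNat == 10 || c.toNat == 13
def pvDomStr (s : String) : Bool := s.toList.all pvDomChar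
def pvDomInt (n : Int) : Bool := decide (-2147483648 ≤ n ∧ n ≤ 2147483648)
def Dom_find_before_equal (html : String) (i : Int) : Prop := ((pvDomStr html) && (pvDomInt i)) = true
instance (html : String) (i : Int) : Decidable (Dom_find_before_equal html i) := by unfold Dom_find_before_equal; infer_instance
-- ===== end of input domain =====

-- B replaces A's backward character-by-character while-loop by slice + rstrip(" ") + one check
-- of the last remaining character (idiomatic decomposition, same cost).

-- ===== PORT A =====
-- the 'while i > 0' loop of A; pyGet? none = IndexError (those inputs are outside Pre_)
def pvLoopA (cs : List Char) (i : Int) : Option Int :=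
  if _h : 0 < i then
    match PySem.List.pyGet? cs i with
    | none => none
    | some c =>
      if c = ' ' then pvLoopA cs (i - 1)
      else if c = '=' then some i
      else some (-1)
  else none
termination_by i.toNat
decreasing_by omega

def find_before_equal (html : String) (i : Int) : Option Int :=
  pvLoopA html.toList i

-- ===== PORT B =====
-- rstrip(" ") of Source B, ported by hand (exact: drops exactly the trailing spaces)
def pvRstripSpace (xs : List Char) : List Char :=
  (xs.reverse.dropWhile (· = ' ')).reverse

def find_before_equal_alt (html : String) (i : Int) : Option Int :=
  if i < 0 then none
  else
  let s := pvRstripSpace (PySem.List.slice html.toList none (some (i + 1)))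
  if s = [] then none
  else
    let j : Int := (s.length : Int) - 1
    match PySem.List.pyGet? s j with
    | some c => if c = '=' then some j else some (-1)
    | none => none

-- ===== PRECONDITION & SPEC =====
-- Pre_ excludes exactly the inputs where A raises IndexError: i > 0 with i ≥ len(html).
def Pre_find_before_equal (html : String) (i : Int) : Prop :=
  0 < i → i < (html.toList.length : Int)
instance (html : String) (i : Int) : Decidable (Pre_find_before_equal html i) := by
  unfold Pre_find_before_equal; infer_instance

def pvWitness_find_before_equal : String × Int := ("a = x", 4)

-- When 0 ≤ i and html[1:i+1] is all spaces but html[0] is not a space, A's loop stops before ever examining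
-- index 0 and returns None; B checks that last non-space character and returns 0 if it is '='
-- else -1, the intended 'find the non-space char before position i' behaviour.
def D_find_before_equal (html : String) (i : Int) : Prop :=
  0 ≤ i ∧ html.toList ≠ [] ∧ html.toList.head? ≠ some ' ' ∧
    (((html.toList.drop 1).take i.toNat).all (fun c => c == ' ')) = true
instance (html : String) (i : Int) : Decidable (D_find_before_equal html i) := by
  unfold D_find_before_equal; infer_instance

def Spec_find_before_equal (html : String) (i : Int) (out : Option Int) : Prop :=
  ¬ D_find_before_equal html i → out = find_before_equal_alt html i
instance (html : String) (i : Int) (out : Option Int) : Decidable (Spec_find_before_equal html i out) := by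
  unfold Spec_find_before_equal; infer_instance

def pvDiffWitness_find_before_equal : String × Int := ("= ", 1)
def pvDiffWitnessOut_find_before_equal : (Option Int) × (Option Int) := (none, some 0)

-- ===== CLAIM (what is proved, stated in full; the proofs are below) =====
def Claim_unchanged_find_before_equal : Prop := ∀ (html : String) (i : Int), Dom_find_before_equal html i → Pre_find_before_equal html i → Spec_find_before_equal html i (find_before_equal html i)
def Claim_changed_find_before_equal : Prop := Dom_find_before_equal (pvDiffWitness_find_before_equal.1) (pvDiffWitness_find_before_equal.2) ∧ Pre_find_before_equal (pvDiffWitness_find_before_equal.1) (pvDiffWitness_find_before_equal.2) ∧ D_find_before_equal (pvDiffWitness_find_before_equal.1) (pvDiffWitness_find_before_equal.2) ∧ find_before_equal (pvDiffWitness_find_before_equal.1) (pvDiffWitness_find_before_equal.2) = pvDiffWitnessOut_find_before_equal.1 ∧ find_before_equal_alt (pvDiffWitness_find_before_equal.1) (pvDiffWitness_find_before_equal.2) = pvDiffWitnessOut_find_before_equal.2 ∧ pvDiffWitnessOut_find_before_equal.1 ≠ pvDiffWitnessOut_find_before_equal.2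
def Claim_exact_find_before_equal : Prop := ∀ (html : String) (i : Int), Dom_find_before_equal html i → Pre_find_before_equal html i → D_find_before_equal html i → find_before_equal html i ≠ find_before_equal_alt html i

-- ===== LEMMAS AND PROOFS =====

theorem pvRstrip_append_space (xs : List Char) :
    pvRstripSpace (xs ++ [' ']) = pvRstripSpace xs := by
  simp [pvRstripSpace]

theorem pvRstrip_append_ne (xs : List Char) {c : Char} (h : c ≠ ' ') :
    pvRstripSpace (xs ++ [c]) = xs ++ [c] := by
  simp [pvRstripSpace, h]

theorem pvRstrip_eq_nil {xs : List Char} (h : pvRstripSpace xs = []) :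
    ∀ c ∈ xs, c = ' ' := by
  intro c hc
  have h' : xs.reverse.dropWhile (· = ' ') = [] := by
    have := congrArg List.reverse h
    simpa [pvRstripSpace] using this
  have := (List.dropWhile_eq_nil_iff).1 h' c (by simpa using hc)
  simpa using this

-- B's body as a function of the natural index n (= i.toNat)
def pvCore (cs : List Char) (n : Nat) : Option Int :=
  let s := pvRstripSpace (cs.take (n + 1))
  if s = [] then none
  else
    let j : Int := (s.length : Int) - 1
    match PySem.List.pyGet? s j with
    | some c => if c = '=' then some j else some (-1)
    | none => none

theorem pvAlt_eq_core (html : String) (i : Int) (hi : 0 ≤ i) :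
    find_before_equal_alt html i = pvCore html.toList i.toNat := by
  unfold find_before_equal_alt pvCore
  rw [if_neg (by omega), PySem.List.slice_to _ (by omega)]
  have : (i + 1).toNat = i.toNat + 1 := by omega
  rw [this]

theorem pvTake_succ_of_lt {α : Type} (cs : List α) (n : Nat) (h : n < cs.length) :
    cs.take (n + 1) = cs.take n ++ [cs[n]] := by
  rw [List.take_add_one, List.getElem?_eq_getElem h]
  rfl

theorem pvDropTake_succ (cs : List Char) (n : Nat) (h : n + 1 < cs.length) :
    (cs.drop 1).take (n + 1) = (cs.drop 1).take n ++ [cs[n + 1]] := by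
  have hl : n < (cs.drop 1).length := by simp; omega
  have he : (cs.drop 1)[n]'hl = cs[n + 1] := by
    rw [List.getElem_drop]
    congr 1
    omega
  rw [pvTake_succ_of_lt _ n hl, he]

-- A = B outside D_, for indices inside Pre_
theorem pvMain (cs : List Char) (n : Nat) (h : 0 < n → n < cs.length)
    (hD : ¬ (cs ≠ [] ∧ cs.head? ≠ some ' ' ∧ (((cs.drop 1).take n).all (fun c => c == ' ')) = true)) :
    pvLoopA cs (n : Int) = pvCore cs n := by
  induction n with
  | zero =>
      rw [pvLoopA, dif_neg (by omega)]
      simp only [List.take_zero, List.all_nil, ne_eq, and_true, not_and, not_not] at hD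
      rcases cs with _ | ⟨c, t⟩
      · simp [pvCore, pvRstripSpace]
      · have hc : c = ' ' := by simpa using hD (by simp)
        subst hc
        simp [pvCore, pvRstripSpace]
  | succ m ih =>
      have hlt : m + 1 < cs.length := h (by omega)
      rw [pvLoopA, dif_pos (by omega)]
      have hget : PySem.List.pyGet? cs ((m + 1 : Nat) : Int) = some cs[m + 1] := by
        rw [PySem.List.pyGet?_natCast, List.getElem?_eq_getElem hlt]
      push_cast at hget ⊢
      rw [hget]
      dsimp only
      by_cases hc : cs[m + 1] = ' '
      · rw [if_pos hc]
        have hstep : ((m : Int) + 1 - 1) = (m : Int) := by omega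
        have hD' : ¬ (cs ≠ [] ∧ cs.head? ≠ some ' ' ∧ (((cs.drop 1).take m).all (fun c => c == ' ')) = true) := by
          intro ⟨h1, h2, h3⟩
          exact hD ⟨h1, h2, by rw [pvDropTake_succ cs m hlt, hc, List.all_append, h3]; decide⟩
        rw [hstep, ih (by omega) hD']
        unfold pvCore
        have : cs.take (m + 1 + 1) = cs.take (m + 1) ++ [' '] := by
          rw [pvTake_succ_of_lt cs (m + 1) hlt, hc]
        rw [this, pvRstrip_append_space]
      · rw [if_neg hc]
        unfold pvCore
        have hs : pvRstripSpace (cs.take (m + 1 + 1)) = cs.take (m + 1) ++ [cs[m + 1]] := by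
          rw [pvTake_succ_of_lt cs (m + 1) hlt, pvRstrip_append_ne _ hc]
        have hlen : (cs.take (m + 1) ++ [cs[m + 1]]).length = m + 2 := by
          simp; omega
        have hne : ¬(cs.take (m + 1) ++ [cs[m + 1]] = []) := by
          intro hx; rw [hx] at hlen; simp at hlen
        rw [hs]
        dsimp only
        rw [if_neg hne, hlen]
        have hj : ((m + 2 : Nat) : Int) - 1 = ((m + 1 : Nat) : Int) := by push_cast; ring
        rw [hj]
        have hgets : PySem.List.pyGet? (cs.take (m + 1) ++ [cs[m + 1]]) ((m + 1 : Nat) : Int)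
            = some cs[m + 1] := by
          rw [PySem.List.pyGet?_natCast]
          rw [List.getElem?_append_right (by simp)]
          simp [List.length_take, Nat.min_eq_left (by omega : m + 1 ≤ cs.length)]
        rw [hgets]
        dsimp only
        push_cast
        rfl

-- inside D_ (and Pre_), A's loop returns none
theorem pvLoopA_none (cs : List Char) (n : Nat) (h : 0 < n → n < cs.length)
    (hall : (((cs.drop 1).take n).all (fun c => c == ' ')) = true) :
    pvLoopA cs (n : Int) = none := by
  induction n with
  | zero => rw [pvLoopA, dif_neg (by omega)]
  | succ m ih =>
      have hlt : m + 1 < cs.length := h (by omega)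
      rw [pvLoopA, dif_pos (by omega)]
      have hget : PySem.List.pyGet? cs ((m + 1 : Nat) : Int) = some cs[m + 1] := by
        rw [PySem.List.pyGet?_natCast, List.getElem?_eq_getElem hlt]
      push_cast at hget ⊢
      rw [hget]
      rw [pvDropTake_succ cs m hlt] at hall
      simp only [List.all_append, List.all_cons, List.all_nil, Bool.and_true, Bool.and_eq_true,
        beq_iff_eq] at hall
      dsimp only
      rw [if_pos hall.2]
      have hstep : ((m : Int) + 1 - 1) = (m : Int) := by omega
      rw [hstep]
      exact ih (by omega) hall.1

-- inside D_, B returns some value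
theorem pvCore_ne_none (cs : List Char) (n : Nat) (h1 : cs ≠ []) (h2 : cs.head? ≠ some ' ') :
    pvCore cs n ≠ none := by
  unfold pvCore
  have hne : pvRstripSpace (cs.take (n + 1)) ≠ [] := by
    intro hnil
    match cs, h1 with
    | c :: t, _ =>
      have hc : c ≠ ' ' := by simpa using h2
      have hmem : c ∈ (c :: t).take (n + 1) := by simp
      exact hc (pvRstrip_eq_nil hnil c hmem)
  dsimp only
  rw [if_neg hne]
  cases hg : PySem.List.pyGet? (pvRstripSpace (cs.take (n + 1))) ((pvRstripSpace (cs.take (n + 1))).length - 1 : Int) with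
  | none =>
      exfalso
      have hlen : 0 < (pvRstripSpace (cs.take (n + 1))).length := List.length_pos_of_ne_nil hne
      have : ((pvRstripSpace (cs.take (n + 1))).length - 1 : Int) = (((pvRstripSpace (cs.take (n + 1))).length - 1 : Nat) : Int) := by omega
      rw [this, PySem.List.pyGet?_natCast, List.getElem?_eq_getElem (by omega)] at hg
      simp at hg
  | some c =>
      dsimp only
      split_ifs <;> simp

-- ===== VERDICT (by name: the statements are the Claim_ definitions above) =====
theorem find_before_equal_spec : Claim_unchanged_find_before_equal := by
  intro html i _ hpre hD
  by_cases h0 : 0 ≤ i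
  · have hto : i = (i.toNat : Int) := by omega
    rw [find_before_equal, pvAlt_eq_core html i h0, hto]
    refine pvMain _ _ (fun hn => ?_) (fun hrest => hD ⟨h0, hrest⟩)
    have := hpre (by omega)
    omega
  · rw [find_before_equal, pvLoopA, dif_neg (by omega)]
    unfold find_before_equal_alt
    rw [if_pos (by omega)]

theorem find_before_equal_changed : Claim_changed_find_before_equal := by
  unfold Claim_changed_find_before_equal
  refine ⟨by decide, by decide, by decide, ?_, by decide, by decide⟩
  show find_before_equal "= " 1 = none
  rw [find_before_equal, pvLoopA, dif_pos (by norm_num)]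
  have h1 : PySem.List.pyGet? "= ".toList 1 = some ' ' := by decide
  rw [h1]
  dsimp only
  rw [if_pos rfl]
  have h2 : (1 : Int) - 1 = 0 := by norm_num
  rw [h2, pvLoopA, dif_neg (by norm_num)]

theorem find_before_equal_tight : Claim_exact_find_before_equal := by
  intro html i _ hpre hD
  obtain ⟨h0, h1, h2, h3⟩ := hD
  have hto : i = (i.toNat : Int) := by omega
  rw [find_before_equal, pvAlt_eq_core html i h0, hto]
  rw [pvLoopA_none _ _ (fun hn => by have := hpre (by omega); omega) h3]
  exact fun h => pvCore_ne_none _ _ h1 h2 h.symm
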